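-- pv_equiv track=rewrite | github.com/2405008450/xinshi_system | workflow_crud.py | get_effective_stages
-- ===== SOURCE A (Python) =====
-- from typing import Optional, List
--
-- ALL_STAGES = [
--     {'key': 'reception',           'title': '客户专员',   'role': '客户专员'},
--     {'key': 'layout_assign',       'title': '排版指派',   'role': '排版专员'},
--     {'key': 'project_manager',     'title': '项目经理',   'role': '项目经理'},
--     {'key': 'project_specialist',  'title': '项目专员',   'role': '项目专员'},
--     {'key': 'project_assistant',   'title': '项目助理',   'role': '项目助理'},
--     {'key': 'review',              'title': '译审',       'role': '译审'},
--     {'key': 'special_qc',          'title': '专检',       'role': '项目专员'},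
--     {'key': 'layout',              'title': '排版',       'role': '排版专员'},
--     {'key': 'completed',           'title': '完成',       'role': '-'},
-- ]
--
-- def get_effective_stages(difficulty: Optional[str], file_editable: Optional[bool] = True) -> list:
--     """根据难度和文件是否可编辑返回实际流转阶段列表"""
--     if not difficulty:
--         return [ALL_STAGES[0]]  # 仅返回 reception
--
--     steps = list(ALL_STAGES)
--
--     # 文件可编辑时，去掉排版指派
--     if file_editable is not False:
--         steps = [s for s in steps if s['key'] != 'layout_assign']
--
--     if difficulty == 'simple':
--         # 简单：跳过 项目经理、译审
--         return [s for s in steps if s['key'] not in ('project_manager', 'review')]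
--     elif difficulty == 'normal':
--         # 普通：跳过 译审
--         return [s for s in steps if s['key'] != 'review']
--     else:
--         # 复杂：全流程
--         return steps
-- ===== SOURCE B (Python) =====
-- from typing import Optional, List
--
-- ALL_STAGES = [
--     {'key': 'reception',           'title': '客户专员',   'role': '客户专员'},
--     {'key': 'layout_assign',       'title': '排版指派',   'role': '排版专员'},
--     {'key': 'project_manager',     'title': '项目经理',   'role': '项目经理'},
--     {'key': 'project_specialist',  'title': '项目专员',   'role': '项目专员'},
--     {'key': 'project_assistant',   'title': '项目助理',   'role': '项目助理'},
--     {'key': 'review',              'title': '译审',       'role': '译审'},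
--     {'key': 'special_qc',          'title': '专检',       'role': '项目专员'},
--     {'key': 'layout',              'title': '排版',       'role': '排版专员'},
--     {'key': 'completed',           'title': '完成',       'role': '-'},
-- ]
--
-- # Precomputed stage-index table: (tier, editable) -> indices into ALL_STAGES
-- _INDEX_TABLE = {
--     ('simple',  True):  [0, 3, 4, 6, 7, 8],
--     ('simple',  False): [0, 1, 3, 4, 6, 7, 8],
--     ('normal',  True):  [0, 2, 3, 4, 6, 7, 8],
--     ('normal',  False): [0, 1, 2, 3, 4, 6, 7, 8],
--     ('complex', True):  [0, 2, 3, 4, 5, 6, 7, 8],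
--     ('complex', False): [0, 1, 2, 3, 4, 5, 6, 7, 8],
-- }
--
-- def get_effective_stages(difficulty: Optional[str], file_editable: Optional[bool] = True) -> list:
--     """根据难度和文件是否可编辑返回实际流转阶段列表"""
--     if not difficulty:
--         return [ALL_STAGES[0]]
--     tier = difficulty if difficulty in ('simple', 'normal') else 'complex'
--     editable = file_editable is not False
--     return [ALL_STAGES[i] for i in _INDEX_TABLE[(tier, editable)]]
-- ===== Notes on version B (the rewrite author's own statement) =====
-- stated objective: alternative
-- what changed: B replaces A's chained filtering passes with a precomputed lookup table mapping (difficulty tier, editability) to the list of stage indices, then materialises the result by direct indexing into ALL_STAGES.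
import Mathlib
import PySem

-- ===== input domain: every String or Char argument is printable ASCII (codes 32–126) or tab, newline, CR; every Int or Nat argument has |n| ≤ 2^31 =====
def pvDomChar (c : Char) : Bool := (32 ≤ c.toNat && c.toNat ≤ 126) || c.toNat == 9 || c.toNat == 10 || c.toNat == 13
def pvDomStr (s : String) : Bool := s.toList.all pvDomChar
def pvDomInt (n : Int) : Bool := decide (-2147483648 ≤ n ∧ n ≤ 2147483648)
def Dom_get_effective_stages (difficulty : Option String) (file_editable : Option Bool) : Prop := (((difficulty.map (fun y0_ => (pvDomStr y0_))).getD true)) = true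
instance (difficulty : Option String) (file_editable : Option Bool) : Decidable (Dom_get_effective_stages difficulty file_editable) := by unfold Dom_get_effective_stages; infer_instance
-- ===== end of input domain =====

-- B replaces A's chained filtering passes with a precomputed (tier, editable) -> index-list table and direct indexing (return value only).


-- ===== PORT A =====
def pvAllStages : List (List (String × String)) :=
  [ [("key", "reception"), ("title", "客户专员"), ("role", "客户专员")],
    [("key", "layout_assign"), ("title", "排版指派"), ("role", "排版专员")],
    [("key", "project_manager"), ("title", "项目经理"), ("role", "项目经理")],
    [("key", "project_specialist"), ("title", "项目专员"), ("role", "项目专员")],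
    [("key", "project_assistant"), ("title", "项目助理"), ("role", "项目助理")],
    [("key", "review"), ("title", "译审"), ("role", "译审")],
    [("key", "special_qc"), ("title", "专检"), ("role", "项目专员")],
    [("key", "layout"), ("title", "排版"), ("role", "排版专员")],
    [("key", "completed"), ("title", "完成"), ("role", "-")] ]

-- s['key'] on these literal dicts (key always present in pvAllStages): first-match assoc lookup
def pvKey (s : List (String × String)) : String := (s.lookup "key").getD ""

-- A: early return, then two chained filtering passes over a copy of ALL_STAGES
def get_effective_stages (difficulty : Option String) (file_editable : Option Bool) : List (List (String × String)) :=
  match difficulty with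
  | none => [[("key", "reception"), ("title", "客户专员"), ("role", "客户专员")]]
  | some d =>
    if d = "" then [[("key", "reception"), ("title", "客户专员"), ("role", "客户专员")]]
    else
      let steps := pvAllStages
      let steps := if file_editable ≠ some false then steps.filter (fun s => pvKey s ≠ "layout_assign") else steps
      if d = "simple" then steps.filter (fun s => ¬ (pvKey s = "project_manager" ∨ pvKey s = "review"))
      else if d = "normal" then steps.filter (fun s => pvKey s ≠ "review")
      else steps

-- ===== PORT B =====
-- B's dict _INDEX_TABLE: (tier, editable) -> stage indices, as an association list
def pvIndexTable : PySem.Dict (String × Bool) (List Int) :=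
  PySem.Dict.ofList
  [ (("simple", true),  [0, 3, 4, 6, 7, 8]),
    (("simple", false), [0, 1, 3, 4, 6, 7, 8]),
    (("normal", true),  [0, 2, 3, 4, 6, 7, 8]),
    (("normal", false), [0, 1, 2, 3, 4, 6, 7, 8]),
    (("complex", true), [0, 2, 3, 4, 5, 6, 7, 8]),
    (("complex", false), [0, 1, 2, 3, 4, 5, 6, 7, 8]) ]

-- B: classify the input into a table key, look up the index list, index into ALL_STAGES
def get_effective_stages_alt (difficulty : Option String) (file_editable : Option Bool) : List (List (String × String)) :=
  match difficulty with
  | none => [[("key", "reception"), ("title", "客户专员"), ("role", "客户专员")]]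
  | some d =>
    if d = "" then [[("key", "reception"), ("title", "客户专员"), ("role", "客户专员")]]
    else
      let tier := if d = "simple" ∨ d = "normal" then d else "complex"
      let editable := file_editable ≠ some false
      let idxs := (PySem.Dict.get? pvIndexTable (tier, editable)).getD []
      idxs.filterMap (fun i => PySem.List.pyGet? pvAllStages i)  -- ALL_STAGES[i], always in range here

-- ===== PRECONDITION & SPEC =====
def Spec_get_effective_stages (difficulty : Option String) (file_editable : Option Bool) (out : List (List (String × String))) : Prop := out = get_effective_stages_alt difficulty file_editable
instance (difficulty : Option String) (file_editable : Option Bool) (out : List (List (String × String))) : Decidable (Spec_get_effective_stages difficulty file_editable out) := by unfold Spec_get_effective_stages; infer_instance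

-- ===== CLAIM (what is proved, stated in full; the proofs are below) =====
def Claim_equal_get_effective_stages : Prop := ∀ (difficulty : Option String) (file_editable : Option Bool), Dom_get_effective_stages difficulty file_editable → Spec_get_effective_stages difficulty file_editable (get_effective_stages difficulty file_editable)

-- ===== LEMMAS AND PROOFS =====

-- ===== VERDICT (by name: the statement is the Claim_ definition above) =====
theorem get_effective_stages_spec : Claim_equal_get_effective_stages := by
  intro d fe _
  unfold Spec_get_effective_stages
  cases d with
  | none => rfl
  | some s =>
    by_cases h0 : s = ""
    · subst h0; rcases fe with _ | b <;> [rfl; cases b <;> rfl]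
    · by_cases h1 : s = "simple"
      · subst h1; rcases fe with _ | b <;> [rfl; cases b <;> rfl]
      · by_cases h2 : s = "normal"
        · subst h2; rcases fe with _ | b <;> [rfl; cases b <;> rfl]
        · simp only [get_effective_stages, get_effective_stages_alt, if_neg h0, h1, h2,
            or_self, if_false]
          rcases fe with _ | b <;> [rfl; cases b <;> rfl]
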